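-- pv_equiv track=rewrite | github.com/Pumiz/GOMEZVALLE_MARTIN_FINAL | funciones.py | secuencia_mas_corta
-- ===== SOURCE A (Python) =====
-- def secuencia_mas_corta(matriz):
--     filas = len(matriz)
--     columnas = len(matriz[0])
--     secuencia_minima = []
--
--     for i in range(filas):
--         for j in range(columnas):
--             numero_actual = int(matriz[i][j])
--             secuencia_actual = [numero_actual]
--
--             if i < filas - 1 and numero_actual + 1 == int(matriz[i + 1][j]):
--                 secuencia_actual.append(int(matriz[i + 1][j]))
--
--             if j < columnas - 1 and numero_actual + 1 == int(matriz[i][j + 1]):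
--                 secuencia_actual.append(int(matriz[i][j + 1]))
--
--             if len(secuencia_actual) > 1 and (len(secuencia_actual) < len(secuencia_minima) or not secuencia_minima):
--                 secuencia_minima = secuencia_actual
--
--     return  secuencia_minima
-- ===== SOURCE B (Python) =====
-- def secuencia_mas_corta(matriz):
--     filas = len(matriz)
--     columnas = len(matriz[0])
--
--     def buscar(condicion, construir):
--         for i in range(filas):
--             for j in range(columnas):
--                 v = int(matriz[i][j])
--                 abajo = i + 1 < filas and int(matriz[i + 1][j]) == v + 1
--                 derecha = j + 1 < columnas and int(matriz[i][j + 1]) == v + 1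
--                 if condicion(abajo, derecha):
--                     return construir(v)
--         return None
--
--     dos = buscar(lambda a, d: a != d, lambda v: [v, v + 1])
--     if dos is not None:
--         return dos
--     tres = buscar(lambda a, d: a and d, lambda v: [v, v + 1, v + 1])
--     if tres is not None:
--         return tres
--     return []
-- ===== Notes on version B (the rewrite author's own statement) =====
-- stated objective: alternative
-- what changed: A accumulates a running shortest-sequence over one streaming pass; B has no accumulator at all: it performs staged searches via a parametric scanner - a first scan returning the first cell with exactly one increasing neighbour as [v, v+1], and only if none exists a second scan returning the first cell with both neighbours as [v, v+1, v+1], else [].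
-- outside the precondition, e.g. on secuencia_mas_corta([]): A raises IndexError, B raises IndexError
import Mathlib
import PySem

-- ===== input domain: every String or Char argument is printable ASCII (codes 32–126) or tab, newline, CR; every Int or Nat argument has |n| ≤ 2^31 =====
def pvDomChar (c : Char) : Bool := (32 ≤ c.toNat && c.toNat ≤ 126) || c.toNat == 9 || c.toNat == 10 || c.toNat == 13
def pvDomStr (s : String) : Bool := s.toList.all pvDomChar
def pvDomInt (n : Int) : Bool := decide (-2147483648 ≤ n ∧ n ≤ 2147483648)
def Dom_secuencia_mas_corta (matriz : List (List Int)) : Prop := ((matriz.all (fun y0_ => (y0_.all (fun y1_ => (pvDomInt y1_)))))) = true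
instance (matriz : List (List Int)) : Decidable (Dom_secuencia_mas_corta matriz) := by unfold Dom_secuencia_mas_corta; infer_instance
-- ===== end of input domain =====

-- B replaces A's streaming running-minimum with staged searches (no accumulator): a first
-- full scan for a cell with exactly one increasing neighbour, then a second scan for a cell
-- with both; objective: alternative decomposition, same asymptotic cost.

-- ===== PORT A =====
-- matriz[i][j]; the .getD defaults are never reached inside Pre_ (Python raises there)
def pvCell (matriz : List (List Int)) (i j : Int) : Int :=
  (PySem.List.pyGet? ((PySem.List.pyGet? matriz i).getD []) j).getD 0

-- the body of A's inner loop: build secuencia_actual for cell (i, j)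
def pvCand (matriz : List (List Int)) (filas columnas i j : Int) : List Int :=
  let numero := pvCell matriz i j
  let s1 := [numero]
  let s2 := if i < filas - 1 ∧ numero + 1 = pvCell matriz (i+1) j then s1 ++ [pvCell matriz (i+1) j] else s1
  let s3 := if j < columnas - 1 ∧ numero + 1 = pvCell matriz i (j+1) then s2 ++ [pvCell matriz i (j+1)] else s2
  s3

-- A's update of secuencia_minima
def pvStep (sm c : List Int) : List Int :=
  if 1 < c.length ∧ (c.length < sm.length ∨ sm = []) then c else sm

def secuencia_mas_corta (matriz : List (List Int)) : List Int :=
  let filas : Int := matriz.length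
  let columnas : Int := (((PySem.List.pyGet? matriz 0).getD []).length : Int)
  (PySem.List.pyRange 0 filas 1).foldl (fun sm i =>
    (PySem.List.pyRange 0 columnas 1).foldl (fun sm j =>
      pvStep sm (pvCand matriz filas columnas i j)) sm) []

-- ===== PORT B =====
-- Source B's inner helper 'buscar': scan the cells in row-major order, return construir(v)
-- at the first cell whose (abajo, derecha) neighbour flags satisfy condicion, else None
def pvBuscar (matriz : List (List Int)) (filas columnas : Int)
    (condicion : Bool → Bool → Bool) (construir : Int → List Int) :
    List (Int × Int) → Option (List Int)
  | [] => none
  | (i, j) :: rest =>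
    let v := pvCell matriz i j
    let abajo := decide (i + 1 < filas ∧ pvCell matriz (i+1) j = v + 1)
    let derecha := decide (j + 1 < columnas ∧ pvCell matriz i (j+1) = v + 1)
    if condicion abajo derecha then some (construir v)
    else pvBuscar matriz filas columnas condicion construir rest

-- the row-major cell order of Source B's nested 'for i … for j …' loops
def pvCeldas (filas columnas : Int) : List (Int × Int) :=
  (PySem.List.pyRange 0 filas 1).flatMap
    (fun i => (PySem.List.pyRange 0 columnas 1).map (fun j => (i, j)))

def secuencia_mas_corta_alt (matriz : List (List Int)) : List Int :=
  let filas : Int := matriz.length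
  let columnas : Int := (((PySem.List.pyGet? matriz 0).getD []).length : Int)
  let ijs := pvCeldas filas columnas
  match pvBuscar matriz filas columnas (fun a d => a != d) (fun v => [v, v+1]) ijs with
  | some dos => dos
  | none =>
    match pvBuscar matriz filas columnas (fun a d => a && d) (fun v => [v, v+1, v+1]) ijs with
    | some tres => tres
    | none => []

-- ===== PRECONDITION & SPEC =====
-- Python A raises IndexError on [] (matriz[0]) and on any row shorter than the first row
-- (matriz[i][j] with j < columnas); exactly those inputs are excluded.
def Pre_secuencia_mas_corta (matriz : List (List Int)) : Prop :=
  matriz ≠ [] ∧ ∀ fila ∈ matriz, (matriz.headD []).length ≤ fila.length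

instance (matriz : List (List Int)) : Decidable (Pre_secuencia_mas_corta matriz) := by
  unfold Pre_secuencia_mas_corta; infer_instance

def pvWitness_secuencia_mas_corta : List (List Int) := [[1, 2], [3, 4]]

def Spec_secuencia_mas_corta (matriz : List (List Int)) (out : List Int) : Prop := out = secuencia_mas_corta_alt matriz
instance (matriz : List (List Int)) (out : List Int) : Decidable (Spec_secuencia_mas_corta matriz out) := by unfold Spec_secuencia_mas_corta; infer_instance

-- ===== CLAIM (what is proved, stated in full; the proofs are below) =====
def Claim_equal_secuencia_mas_corta : Prop := ∀ (matriz : List (List Int)), Dom_secuencia_mas_corta matriz → Pre_secuencia_mas_corta matriz → Spec_secuencia_mas_corta matriz (secuencia_mas_corta matriz)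

-- ===== LEMMAS AND PROOFS =====

-- what A's streaming fold computes: the first length-2 candidate, else the first length-3
def pvPick (cs : List (List Int)) : List Int :=
  match cs.find? (fun c => c.length == 2) with
  | some c => c
  | none => (cs.find? (fun c => c.length == 3)).getD []

theorem pvCand_both (matriz : List (List Int)) (filas columnas i j : Int)
    (hA : i + 1 < filas ∧ pvCell matriz (i+1) j = pvCell matriz i j + 1)
    (hD : j + 1 < columnas ∧ pvCell matriz i (j+1) = pvCell matriz i j + 1) :
    pvCand matriz filas columnas i j =
      [pvCell matriz i j, pvCell matriz i j + 1, pvCell matriz i j + 1] := by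
  obtain ⟨hA1, hA2⟩ := hA; obtain ⟨hD1, hD2⟩ := hD
  simp only [pvCand]
  rw [if_pos ⟨by omega, hD2.symm⟩, if_pos ⟨by omega, hA2.symm⟩, hA2, hD2]
  rfl

theorem pvCand_down (matriz : List (List Int)) (filas columnas i j : Int)
    (hA : i + 1 < filas ∧ pvCell matriz (i+1) j = pvCell matriz i j + 1)
    (hD : ¬ (j + 1 < columnas ∧ pvCell matriz i (j+1) = pvCell matriz i j + 1)) :
    pvCand matriz filas columnas i j = [pvCell matriz i j, pvCell matriz i j + 1] := by
  obtain ⟨hA1, hA2⟩ := hA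
  simp only [pvCand]
  rw [if_neg (fun h => hD ⟨by have := h.1; omega, h.2.symm⟩),
      if_pos ⟨by omega, hA2.symm⟩, hA2]
  rfl

theorem pvCand_right (matriz : List (List Int)) (filas columnas i j : Int)
    (hA : ¬ (i + 1 < filas ∧ pvCell matriz (i+1) j = pvCell matriz i j + 1))
    (hD : j + 1 < columnas ∧ pvCell matriz i (j+1) = pvCell matriz i j + 1) :
    pvCand matriz filas columnas i j = [pvCell matriz i j, pvCell matriz i j + 1] := by
  obtain ⟨hD1, hD2⟩ := hD
  simp only [pvCand]
  rw [if_pos ⟨by omega, hD2.symm⟩, if_neg (fun h => hA ⟨by have := h.1; omega, h.2.symm⟩), hD2]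
  rfl

theorem pvCand_none (matriz : List (List Int)) (filas columnas i j : Int)
    (hA : ¬ (i + 1 < filas ∧ pvCell matriz (i+1) j = pvCell matriz i j + 1))
    (hD : ¬ (j + 1 < columnas ∧ pvCell matriz i (j+1) = pvCell matriz i j + 1)) :
    pvCand matriz filas columnas i j = [pvCell matriz i j] := by
  simp only [pvCand]
  rw [if_neg (fun h => hD ⟨by have := h.1; omega, h.2.symm⟩),
      if_neg (fun h => hA ⟨by have := h.1; omega, h.2.symm⟩)]

theorem pvCand_length_le (matriz : List (List Int)) (filas columnas i j : Int) :
    (pvCand matriz filas columnas i j).length ≤ 3 := by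
  simp only [pvCand]; split_ifs <;> simp

-- B's pass 1 finds exactly the first length-2 candidate
theorem pvBuscar2_eq (matriz : List (List Int)) (filas columnas : Int) (ijs : List (Int × Int)) :
    pvBuscar matriz filas columnas (fun a d => a != d) (fun v => [v, v+1]) ijs
      = (ijs.map (fun p => pvCand matriz filas columnas p.1 p.2)).find? (fun c => c.length == 2) := by
  induction ijs with
  | nil => rfl
  | cons p rest ih =>
    obtain ⟨i, j⟩ := p
    by_cases hA : i + 1 < filas ∧ pvCell matriz (i+1) j = pvCell matriz i j + 1 <;>
      by_cases hD : j + 1 < columnas ∧ pvCell matriz i (j+1) = pvCell matriz i j + 1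
    · simp [pvBuscar, decide_eq_true hA, decide_eq_true hD,
        pvCand_both matriz filas columnas i j hA hD, ih]
    · simp [pvBuscar, decide_eq_true hA, decide_eq_false hD,
        pvCand_down matriz filas columnas i j hA hD]
    · simp [pvBuscar, decide_eq_false hA, decide_eq_true hD,
        pvCand_right matriz filas columnas i j hA hD]
    · simp [pvBuscar, decide_eq_false hA, decide_eq_false hD,
        pvCand_none matriz filas columnas i j hA hD, ih]

-- B's pass 2 finds exactly the first length-3 candidate
theorem pvBuscar3_eq (matriz : List (List Int)) (filas columnas : Int) (ijs : List (Int × Int)) :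
    pvBuscar matriz filas columnas (fun a d => a && d) (fun v => [v, v+1, v+1]) ijs
      = (ijs.map (fun p => pvCand matriz filas columnas p.1 p.2)).find? (fun c => c.length == 3) := by
  induction ijs with
  | nil => rfl
  | cons p rest ih =>
    obtain ⟨i, j⟩ := p
    by_cases hA : i + 1 < filas ∧ pvCell matriz (i+1) j = pvCell matriz i j + 1 <;>
      by_cases hD : j + 1 < columnas ∧ pvCell matriz i (j+1) = pvCell matriz i j + 1
    · simp [pvBuscar, decide_eq_true hA, decide_eq_true hD,
        pvCand_both matriz filas columnas i j hA hD]
    · simp [pvBuscar, decide_eq_true hA, decide_eq_false hD,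
        pvCand_down matriz filas columnas i j hA hD, ih]
    · simp [pvBuscar, decide_eq_false hA, decide_eq_true hD,
        pvCand_right matriz filas columnas i j hA hD, ih]
    · simp [pvBuscar, decide_eq_false hA, decide_eq_false hD,
        pvCand_none matriz filas columnas i j hA hD, ih]

theorem pvStep_len2 (sm c : List Int) (h : sm.length = 2) : pvStep sm c = sm := by
  unfold pvStep
  rw [if_neg]
  rintro ⟨h1, h2 | h2⟩
  · omega
  · simp [h2] at h

theorem foldl_pvStep_len2 (cs : List (List Int)) (sm : List Int) (h : sm.length = 2) :
    List.foldl pvStep sm cs = sm := by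
  induction cs with
  | nil => rfl
  | cons c cs ih => simpa [List.foldl, pvStep_len2 sm c h] using ih

theorem foldl_pvStep_len3 (cs : List (List Int)) (sm : List Int) (h : sm.length = 3)
    (hb : ∀ c ∈ cs, c.length ≤ 3) :
    List.foldl pvStep sm cs = (cs.find? (fun c => c.length == 2)).getD sm := by
  induction cs with
  | nil => rfl
  | cons c cs ih =>
    by_cases h2 : c.length = 2
    · have hst : pvStep sm c = c := by
        unfold pvStep; rw [if_pos ⟨by omega, Or.inl (by omega)⟩]
      rw [List.foldl_cons, hst, foldl_pvStep_len2 cs c h2,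
        List.find?_cons_of_pos (by simp [h2])]
      rfl
    · have hst : pvStep sm c = sm := by
        unfold pvStep
        rw [if_neg]
        rintro ⟨h1, hlt | he⟩
        · omega
        · simp [he] at h
      rw [List.foldl_cons, hst, List.find?_cons_of_neg (by simp [h2])]
      exact ih (fun d hd => hb d (List.mem_cons_of_mem _ hd))

theorem foldl_pvStep_nil (cs : List (List Int)) (hb : ∀ c ∈ cs, c.length ≤ 3) :
    List.foldl pvStep [] cs = pvPick cs := by
  induction cs with
  | nil => rfl
  | cons c cs ih =>
    have hb' : ∀ d ∈ cs, d.length ≤ 3 := fun d hd => hb d (List.mem_cons_of_mem _ hd)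
    by_cases h2 : c.length = 2
    · have hst : pvStep [] c = c := by unfold pvStep; rw [if_pos ⟨by omega, Or.inr rfl⟩]
      rw [List.foldl_cons, hst, foldl_pvStep_len2 cs c h2]
      unfold pvPick
      rw [List.find?_cons_of_pos (by simp [h2])]
    · by_cases h3 : c.length = 3
      · have hst : pvStep [] c = c := by unfold pvStep; rw [if_pos ⟨by omega, Or.inr rfl⟩]
        rw [List.foldl_cons, hst, foldl_pvStep_len3 cs c h3 hb']
        unfold pvPick
        rw [List.find?_cons_of_neg (by simp [h2]), List.find?_cons_of_pos (by simp [h3])]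
        cases List.find? (fun c => c.length == 2) cs <;> simp
      · have h1 : c.length ≤ 1 := by have := hb c (by simp); omega
        have hst : pvStep [] c = [] := by
          unfold pvStep; rw [if_neg]; rintro ⟨hgt, -⟩; omega
        rw [List.foldl_cons, hst, ih hb']
        unfold pvPick
        rw [List.find?_cons_of_neg (by simp [h2]), List.find?_cons_of_neg (by simp [h3])]

-- fold over nested loops = fold over the flattened cell list
theorem foldl_flatMap_eq {α β γ : Type} (f : γ → β → γ) (g : α → List β)
    (l : List α) (init : γ) :
    List.foldl f init (l.flatMap g) = List.foldl (fun s a => List.foldl f s (g a)) init l := by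
  induction l generalizing init with
  | nil => rfl
  | cons a l ih => simp [List.flatMap_cons, List.foldl_append, ih]

theorem secuencia_eq (matriz : List (List Int)) :
    secuencia_mas_corta matriz = secuencia_mas_corta_alt matriz := by
  unfold secuencia_mas_corta secuencia_mas_corta_alt
  dsimp only
  set filas : Int := (matriz.length : Int) with hfilas
  set columnas : Int := (((PySem.List.pyGet? matriz 0).getD []).length : Int) with hcols
  set cands : List (List Int) :=
    (pvCeldas filas columnas).map (fun p => pvCand matriz filas columnas p.1 p.2) with hcands
  have hb : ∀ c ∈ cands, c.length ≤ 3 := by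
    intro c hc
    rw [hcands] at hc
    obtain ⟨p, -, rfl⟩ := List.mem_map.mp hc
    exact pvCand_length_le matriz filas columnas p.1 p.2
  have hAeq : (PySem.List.pyRange 0 filas 1).foldl (fun sm i =>
      (PySem.List.pyRange 0 columnas 1).foldl (fun sm j =>
        pvStep sm (pvCand matriz filas columnas i j)) sm) []
      = List.foldl pvStep [] cands := by
    rw [hcands]
    simp only [pvCeldas, List.map_flatMap, List.map_map]
    rw [foldl_flatMap_eq]
    congr 1
    funext sm i
    rw [List.foldl_map]
    rfl
  rw [hAeq, foldl_pvStep_nil cands hb]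
  rw [pvBuscar2_eq, pvBuscar3_eq, ← hcands]
  simp only [pvPick]
  cases List.find? (fun c => c.length == 2) cands with
  | some c => rfl
  | none => cases List.find? (fun c => c.length == 3) cands <;> rfl

-- ===== VERDICT (by name: the statement is the Claim_ definition above) =====
theorem secuencia_mas_corta_spec : Claim_equal_secuencia_mas_corta := by
  intro matriz _ _
  unfold Spec_secuencia_mas_corta
  exact secuencia_eq matriz
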